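-- pv_equiv track=rewrite | github.com/rap2montemayor/Programming-Problems | CF/1343/C.py | getPositiveSegments
-- ===== SOURCE A (Python) =====
-- def getPositiveSegments(a):
--     posSegments = set()
--     start, end = 0, 0
--     insegment = False
--     for i in range(len(a)):
--         if a[i] > 0 and insegment == False:
--             insegment = True
--             start = i
--         if a[i] < 0  and insegment == True:
--             insegment = False
--             end = i
--             posSegments.add((start,end))
--     if insegment == True:
--         posSegments.add((start,len(a)))
--
--     return posSegments
-- ===== SOURCE B (Python) =====
-- def getPositiveSegments(a):
--     # Staged decomposition: first collect the cut points (indices of negatives,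
--     # plus len(a)), then map each cut-delimited block to the segment starting at
--     # its first positive element (blocks without a positive yield nothing).
--     n = len(a)
--     cuts = [i for i, x in enumerate(a) if x < 0]
--     res = set()
--     lo = 0
--     for e in cuts + [n]:
--         for j in range(lo, e):
--             if a[j] > 0:
--                 res.add((j, e))
--                 break
--         lo = e + 1
--     return res
-- ===== Notes on version B (the rewrite author's own statement) =====
-- stated objective: alternative
-- what changed: Replaces A's single-pass boolean state machine with a staged split-and-map: first collect the cut points (indices of negative elements plus len(a)) by a comprehension, then for each cut-delimited block emit a segment from its first positive element to the cut.
import Mathlib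
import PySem

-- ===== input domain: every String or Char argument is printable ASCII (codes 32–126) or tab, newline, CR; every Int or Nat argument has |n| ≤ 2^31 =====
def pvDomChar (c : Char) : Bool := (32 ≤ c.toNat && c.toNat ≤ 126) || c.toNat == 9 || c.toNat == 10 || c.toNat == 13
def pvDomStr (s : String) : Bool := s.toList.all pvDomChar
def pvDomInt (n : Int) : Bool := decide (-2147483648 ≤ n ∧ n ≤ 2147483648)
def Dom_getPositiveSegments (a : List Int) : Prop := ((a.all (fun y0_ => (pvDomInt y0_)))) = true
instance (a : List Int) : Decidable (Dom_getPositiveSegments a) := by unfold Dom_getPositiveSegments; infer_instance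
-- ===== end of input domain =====

-- B is a staged split-and-map decomposition (collect negative cut points, then map each block
-- to its first positive) instead of A's one-pass boolean state machine; same O(n) cost.
-- A returns a Python set; equality is proved on the insertion-order element lists (which coincide here).

-- ===== PORT A =====
-- the for-loop body of A: state = (posSegments, start, end, insegment), i the loop index
def pvALoop (xs : List Int) (i : Int)
    (s : PySem.Set (Int × Int) × Int × Int × Bool) :
    PySem.Set (Int × Int) × Int × Int × Bool :=
  match xs with
  | [] => s
  | x :: rest =>
    let (segs, start, e, inseg) := s
    let (segs, start, e, inseg) :=
      if x > 0 ∧ inseg = false then (segs, i, e, true) else (segs, start, e, inseg)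
    let (segs, start, e, inseg) :=
      if x < 0 ∧ inseg = true then (PySem.Set.add segs (start, i), start, i, false)
      else (segs, start, e, inseg)
    pvALoop rest (i + 1) (segs, start, e, inseg)

def getPositiveSegments (a : List Int) : List (Int × Int) :=
  let (segs, start, _, inseg) := pvALoop a 0 (PySem.Set.empty, 0, 0, false)
  if inseg = true then PySem.Set.add segs (start, (a.length : Int)) else segs

-- ===== PORT B =====
-- inner 'for j in range(lo, e): if a[j] > 0: … break' — first j in js with a[j] > 0
def pvFirstPos (a : List Int) (js : List Int) : Option Int :=
  match js with
  | [] => none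
  | j :: rest => if PySem.List.pyGetD a j 0 > 0 then some j else pvFirstPos a rest

-- body of the 'for e in cuts + [n]' loop: state = (res, lo)
def pvBStep (a : List Int) (s : PySem.Set (Int × Int) × Int) (e : Int) :
    PySem.Set (Int × Int) × Int :=
  let (res, lo) := s
  let res := match pvFirstPos a (PySem.List.pyRange lo e 1) with
    | some j => PySem.Set.add res (j, e)
    | none => res
  (res, e + 1)

def getPositiveSegments_alt (a : List Int) : List (Int × Int) :=
  let n : Int := (a.length : Int)
  let cuts := (PySem.List.enumerate a).filterMap (fun p => if p.2 < 0 then some p.1 else none)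
  ((cuts ++ [n]).foldl (pvBStep a) (PySem.Set.empty, 0)).1

-- ===== PRECONDITION & SPEC =====
def Spec_getPositiveSegments (a : List Int) (out : List (Int × Int)) : Prop := out = getPositiveSegments_alt a
instance (a : List Int) (out : List (Int × Int)) : Decidable (Spec_getPositiveSegments a out) := by unfold Spec_getPositiveSegments; infer_instance

-- ===== CLAIM (what is proved, stated in full; the proofs are below) =====
def Claim_equal_getPositiveSegments : Prop := ∀ (a : List Int), Dom_getPositiveSegments a → Spec_getPositiveSegments a (getPositiveSegments a)

-- ===== LEMMAS AND PROOFS =====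

-- the closing step of A after the loop
def pvFinish (s : PySem.Set (Int × Int) × Int × Int × Bool) (n : Int) : List (Int × Int) :=
  let (segs, start, _, inseg) := s
  if inseg = true then PySem.Set.add segs (start, n) else segs

-- the negative indices of the suffix xs starting at global index i (proof-side view of 'cuts')
def pvNegIdx (xs : List Int) (i : Int) : List Int :=
  match xs with
  | [] => []
  | x :: rest => if x < 0 then i :: pvNegIdx rest (i + 1) else pvNegIdx rest (i + 1)

theorem pvCuts_eq (xs : List Int) (s : Int) :
    (PySem.List.enumerate xs s).filterMap (fun p => if p.2 < 0 then some p.1 else none)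
      = pvNegIdx xs s := by
  induction xs generalizing s with
  | nil => simp [PySem.List.enumerate_nil, pvNegIdx]
  | cons x rest ih =>
    rw [PySem.List.enumerate_cons]
    by_cases hx : x < 0 <;> simp [List.filterMap, hx, pvNegIdx, ih]

theorem pvSet_add_fresh (segs : PySem.Set (Int × Int)) (p : Int × Int) (h : p ∉ segs) :
    PySem.Set.add segs p = segs ++ [p] := by
  simp [PySem.Set.add, PySem.Set.contains, h]

theorem pvFirstPos_none (a : List Int) :
    ∀ (k : Nat) (lo e : Int), (e - lo).toNat = k →
    (∀ j, lo ≤ j → j < e → ¬ 0 < PySem.List.pyGetD a j 0) →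
    pvFirstPos a (PySem.List.pyRange lo e 1) = none := by
  intro k
  induction k with
  | zero =>
    intro lo e hk _
    rw [PySem.List.pyRange_one_eq_nil (by omega)]
    rfl
  | succ k ih =>
    intro lo e hk h
    rw [PySem.List.pyRange_one_cons (by omega)]
    simp only [pvFirstPos]
    rw [if_neg (h lo le_rfl (by omega))]
    exact ih (lo + 1) e (by omega) (fun j h1 h2 => h j (by omega) h2)

theorem pvFirstPos_some (a : List Int) :
    ∀ (k : Nat) (lo st e : Int), (st - lo).toNat = k →
    lo ≤ st → st < e → 0 < PySem.List.pyGetD a st 0 →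
    (∀ j, lo ≤ j → j < st → ¬ 0 < PySem.List.pyGetD a j 0) →
    pvFirstPos a (PySem.List.pyRange lo e 1) = some st := by
  intro k
  induction k with
  | zero =>
    intro lo st e hk h1 h2 hpos _
    have : lo = st := by omega
    subst this
    rw [PySem.List.pyRange_one_cons (by omega)]
    simp only [pvFirstPos]
    rw [if_pos hpos]
  | succ k ih =>
    intro lo st e hk h1 h2 hpos h
    rw [PySem.List.pyRange_one_cons (by omega)]
    simp only [pvFirstPos]
    rw [if_neg (h lo le_rfl (by omega))]
    exact ih (lo + 1) st e (by omega) (by omega) h2 hpos (fun j ha hb => h j (by omega) hb)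

theorem pvDrop_head (a : List Int) (i : Int) (x : Int) (rest : List Int)
    (h0 : 0 ≤ i) (h : a.drop i.toNat = x :: rest) :
    PySem.List.pyGetD a i 0 = x ∧ a.drop (i + 1).toNat = rest := by
  constructor
  · have hget : a[i.toNat]? = some x := by
      have : (a.drop i.toNat)[0]? = a[i.toNat + 0]? := List.getElem?_drop
      rw [h] at this
      simpa using this.symm
    have hlt : i.toNat < a.length := (List.getElem?_eq_some_iff.mp hget).1
    rw [PySem.List.pyGetD_eq_getElem a 0 h0 (by omega)]
    exact Option.some_injective _ (by rw [← hget]; simp)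
  · have : (i + 1).toNat = i.toNat + 1 := by omega
    rw [this, ← List.drop_drop, h]
    simp

-- main invariant: A's loop state versus B's fold over the remaining cut points.
-- Out-of-segment invariant: every index in [lo, i) is zero; in-segment invariant: the first
-- positive of the current block is start, no negative has occurred in [lo, i).
theorem pvMain (a : List Int) : ∀ (xs : List Int),
    (∀ (i lo : Int) (res : PySem.Set (Int × Int)) (st e : Int),
      0 ≤ lo → lo ≤ i → a.drop i.toNat = xs →
      (∀ j, lo ≤ j → j < i → PySem.List.pyGetD a j 0 = 0) →
      (∀ p ∈ res, p.1 < lo) →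
      pvFinish (pvALoop xs i (res, st, e, false)) (i + xs.length)
        = ((pvNegIdx xs i ++ [i + (xs.length : Int)]).foldl (pvBStep a) (res, lo)).1) ∧
    (∀ (i lo : Int) (res : PySem.Set (Int × Int)) (st e : Int),
      0 ≤ lo → lo ≤ st → st < i → a.drop i.toNat = xs →
      0 < PySem.List.pyGetD a st 0 →
      (∀ j, lo ≤ j → j < st → PySem.List.pyGetD a j 0 ≤ 0) →
      (∀ j, lo ≤ j → j < i → 0 ≤ PySem.List.pyGetD a j 0) →
      (∀ p ∈ res, p.1 < lo) →
      pvFinish (pvALoop xs i (res, st, e, true)) (i + xs.length)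
        = ((pvNegIdx xs i ++ [i + (xs.length : Int)]).foldl (pvBStep a) (res, lo)).1) := by
  intro xs
  induction xs with
  | nil =>
    constructor
    · intro i lo res st e _ hloi _ hzero _
      have hnone : pvFirstPos a (PySem.List.pyRange lo i 1) = none :=
        pvFirstPos_none a (i - lo).toNat lo i rfl
          (fun j h1 h2 => by rw [hzero j h1 h2]; omega)
      simp [pvALoop, pvFinish, pvNegIdx, List.foldl, pvBStep, hnone]
    · intro i lo res st e _ hlost hsti _ hpos hnonpos _ hfresh
      have hsome : pvFirstPos a (PySem.List.pyRange lo i 1) = some st :=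
        pvFirstPos_some a (st - lo).toNat lo st i rfl hlost hsti hpos
          (fun j h1 h2 => by have := hnonpos j h1 h2; omega)
      have hnot : (st, i) ∉ res := fun hmem => absurd (hfresh _ hmem) (by omega)
      simp [pvALoop, pvFinish, pvNegIdx, List.foldl, pvBStep, hsome,
        pvSet_add_fresh res _ hnot]
  | cons x rest ih =>
    have hlen : ∀ i : Int, i + ((x :: rest).length : Int) = (i + 1) + (rest.length : Int) := by
      intro i; simp; ring
    constructor
    · intro i lo res st e hlo hloi hdrop hzero hfresh
      obtain ⟨hgi, hdrop'⟩ := pvDrop_head a i x rest (by omega) hdrop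
      rw [hlen i]
      by_cases hx : x > 0
      · -- enter segment: start := i
        have hstep : pvALoop (x :: rest) i (res, st, e, false)
            = pvALoop rest (i + 1) (res, i, e, true) := by
          have hx2 : ¬ x < 0 := by omega
          simp [pvALoop, hx, hx2]
        rw [hstep, show pvNegIdx (x :: rest) i = pvNegIdx rest (i + 1) by
              simp [pvNegIdx, show ¬ x < 0 by omega]]
        exact ih.2 (i + 1) lo res i e hlo hloi (by omega) hdrop' (by rw [hgi]; omega)
          (fun j h1 h2 => by rw [hzero j h1 h2])
          (fun j h1 h2 => by
            by_cases hji : j < i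
            · rw [hzero j h1 hji]
            · have : j = i := by omega
              subst this; rw [hgi]; omega)
          hfresh
      · by_cases hxneg : x < 0
        · -- negative while out of segment: close the (empty) block
          have hstep : pvALoop (x :: rest) i (res, st, e, false)
              = pvALoop rest (i + 1) (res, st, e, false) := by
            simp [pvALoop, hx]
          have hnone : pvFirstPos a (PySem.List.pyRange lo i 1) = none :=
            pvFirstPos_none a (i - lo).toNat lo i rfl
              (fun j h1 h2 => by rw [hzero j h1 h2]; omega)
          rw [hstep, show pvNegIdx (x :: rest) i = i :: pvNegIdx rest (i + 1) by
                simp [pvNegIdx, hxneg]]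
          rw [List.cons_append, List.foldl_cons,
            show pvBStep a (res, lo) i = (res, i + 1) by simp [pvBStep, hnone]]
          exact ih.1 (i + 1) (i + 1) res st e (by omega) (by omega) hdrop'
            (fun j h1 h2 => by omega)
            (fun p hp => by have := hfresh p hp; omega)
        · -- zero while out of segment
          have hx0 : x = 0 := by omega
          have hstep : pvALoop (x :: rest) i (res, st, e, false)
              = pvALoop rest (i + 1) (res, st, e, false) := by
            simp [pvALoop, hx]
          rw [hstep, show pvNegIdx (x :: rest) i = pvNegIdx rest (i + 1) by
                simp [pvNegIdx, hxneg]]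
          exact ih.1 (i + 1) lo res st e hlo (by omega) hdrop'
            (fun j h1 h2 => by
              by_cases hji : j < i
              · exact hzero j h1 hji
              · have : j = i := by omega
                subst this; rw [hgi, hx0])
            hfresh
    · intro i lo res st e hlo hlost hsti hdrop hpos hnonpos hnonneg hfresh
      obtain ⟨hgi, hdrop'⟩ := pvDrop_head a i x rest (by omega) hdrop
      rw [hlen i]
      by_cases hxneg : x < 0
      · -- segment closes at i
        have hnot : (st, i) ∉ res := fun hmem => absurd (hfresh _ hmem) (by omega)
        have hstep : pvALoop (x :: rest) i (res, st, e, true)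
            = pvALoop rest (i + 1) (res ++ [(st, i)], st, i, false) := by
          have hx2 : ¬ x > 0 := by omega
          simp [pvALoop, hxneg, hx2, pvSet_add_fresh res _ hnot]
        have hsome : pvFirstPos a (PySem.List.pyRange lo i 1) = some st :=
          pvFirstPos_some a (st - lo).toNat lo st i rfl hlost hsti hpos
            (fun j h1 h2 => by have := hnonpos j h1 h2; omega)
        rw [hstep, show pvNegIdx (x :: rest) i = i :: pvNegIdx rest (i + 1) by
              simp [pvNegIdx, hxneg]]
        rw [List.cons_append, List.foldl_cons,
          show pvBStep a (res, lo) i = (res ++ [(st, i)], i + 1) by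
            simp [pvBStep, hsome, pvSet_add_fresh res _ hnot]]
        exact ih.1 (i + 1) (i + 1) (res ++ [(st, i)]) st i (by omega) (by omega) hdrop'
          (fun j h1 h2 => by omega)
          (fun p hp => by
            rcases List.mem_append.mp hp with h | h
            · have := hfresh p h; omega
            · simp at h; rw [h]; simp; omega)
      · -- nonnegative: segment continues
        have hstep : pvALoop (x :: rest) i (res, st, e, true)
            = pvALoop rest (i + 1) (res, st, e, true) := by
          simp [pvALoop, hxneg]
        rw [hstep, show pvNegIdx (x :: rest) i = pvNegIdx rest (i + 1) by
              simp [pvNegIdx, hxneg]]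
        exact ih.2 (i + 1) lo res st e hlo hlost (by omega) hdrop' hpos hnonpos
          (fun j h1 h2 => by
            by_cases hji : j < i
            · exact hnonneg j h1 hji
            · have : j = i := by omega
              subst this; rw [hgi]; omega)
          hfresh

-- ===== VERDICT (by name: the statement is the Claim_ definition above) =====
theorem getPositiveSegments_spec : Claim_equal_getPositiveSegments := by
  intro a _
  unfold Spec_getPositiveSegments getPositiveSegments getPositiveSegments_alt
  have h := (pvMain a a).1 0 0 PySem.Set.empty 0 0 le_rfl le_rfl (by simp)
    (fun j h1 h2 => by omega) (by simp [PySem.Set.empty])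
  simp only [zero_add] at h
  rw [pvCuts_eq a 0, ← h]
  rfl
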